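-- pv_equiv track=rewrite | github.com/Xavier-hm/Inform-tica-I | Python U7/funciones.py | menor_nota_estudiante
-- ===== SOURCE A (Python) =====
-- def menor_nota_estudiante(documento, documentos_estudiantes, notas):
--     if documento in documentos_estudiantes:
--         idx = documentos_estudiantes.index(documento)
--         notas_estudiante = notas[idx]
--         menor_nota = min([nota for nota in notas_estudiante if nota >= 0])
--         curso_idx = notas_estudiante.index(menor_nota)
--         return curso_idx, menor_nota
--     else:
--         return None, None
-- ===== SOURCE B (Python) =====
-- def menor_nota_estudiante(documento, documentos_estudiantes, notas):
--     if documento in documentos_estudiantes: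
--         notas_estudiante = notas[documentos_estudiantes.index(documento)]
--         menor_nota = None
--         curso_idx = None
--         for i, nota in enumerate(notas_estudiante):
--             if nota < 0:
--                 continue
--             if menor_nota is None or nota < menor_nota:
--                 menor_nota = nota
--                 curso_idx = i
--         if menor_nota is None:
--             raise ValueError("no non-negative grades")
--         return curso_idx, menor_nota
--     else:
--         return None, None
-- ===== Notes on version B (the rewrite author's own statement) =====
-- stated objective: alternative
-- what changed: Replaces the three passes over the grade list (filter comprehension, min(), .index()) by one enumerate loop that tracks the best non-negative grade and its first index with a strict-< update.
-- outside the precondition, e.g. on menor_nota_estudiante(1, [1], [[-5]]): A raises ValueError, B raises ValueError; on menor_nota_estudiante(1, [1], []): A raises IndexError, B raises IndexError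
import Mathlib
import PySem

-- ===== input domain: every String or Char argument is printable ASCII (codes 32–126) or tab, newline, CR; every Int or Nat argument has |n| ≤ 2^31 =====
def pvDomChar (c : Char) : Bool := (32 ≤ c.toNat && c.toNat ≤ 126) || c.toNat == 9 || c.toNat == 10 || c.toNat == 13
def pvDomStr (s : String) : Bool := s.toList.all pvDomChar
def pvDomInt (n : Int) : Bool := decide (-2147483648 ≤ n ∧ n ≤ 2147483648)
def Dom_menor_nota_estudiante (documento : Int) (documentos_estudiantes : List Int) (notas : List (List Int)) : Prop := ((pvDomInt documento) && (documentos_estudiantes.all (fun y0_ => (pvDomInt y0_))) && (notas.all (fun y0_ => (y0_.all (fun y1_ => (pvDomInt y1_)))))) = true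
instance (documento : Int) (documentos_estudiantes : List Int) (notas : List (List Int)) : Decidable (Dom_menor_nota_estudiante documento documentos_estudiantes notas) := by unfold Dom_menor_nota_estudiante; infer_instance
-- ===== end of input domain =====

-- B replaces A's three passes (filter comprehension, min(), .index()) by one enumerate
-- loop tracking the best non-negative grade and its first index (objective: alternative
-- single-pass decomposition, same O(n)).

-- ===== PORT A =====
def menor_nota_estudiante (documento : Int) (documentos_estudiantes : List Int) (notas : List (List Int)) : Option Int × Option Int :=
  if documento ∈ documentos_estudiantes then
    match PySem.List.index? documentos_estudiantes documento with
    | none => (none, none)  -- unreachable: documento ∈ documentos_estudiantes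
    | some idx =>
      match PySem.List.pyGet? notas (idx : Int) with
      | none => (none, none)  -- IndexError, excluded by Pre_
      | some notas_estudiante =>
        match PySem.List.min? (notas_estudiante.filter (fun nota => decide (0 ≤ nota))) (fun x => x) with
        | none => (none, none)  -- ValueError min([]), excluded by Pre_
        | some menor_nota =>
          match PySem.List.index? notas_estudiante menor_nota with
          | none => (none, none)  -- unreachable: menor_nota ∈ notas_estudiante
          | some curso_idx => (some (curso_idx : Int), some menor_nota)
  else (none, none)

-- ===== PORT B =====
-- B's enumerate loop: state (menor_nota, curso_idx), i is the running index.
def pvAltLoop : List Int → Int → Option Int × Option Int → Option Int × Option Int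
  | [], _, st => st
  | nota :: rest, i, (menor, curso) =>
    if nota < 0 then pvAltLoop rest (i + 1) (menor, curso)
    else
      match menor with
      | none => pvAltLoop rest (i + 1) (some nota, some i)
      | some b =>
        if nota < b then pvAltLoop rest (i + 1) (some nota, some i)
        else pvAltLoop rest (i + 1) (menor, curso)

def menor_nota_estudiante_alt (documento : Int) (documentos_estudiantes : List Int) (notas : List (List Int)) : Option Int × Option Int :=
  if documento ∈ documentos_estudiantes then
    match PySem.List.index? documentos_estudiantes documento with
    | none => (none, none)  -- unreachable
    | some idx =>
      match PySem.List.pyGet? notas (idx : Int) with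
      | none => (none, none)  -- IndexError, excluded by Pre_
      | some notas_estudiante =>
        match pvAltLoop notas_estudiante 0 (none, none) with
        | (some menor, some curso) => (some curso, some menor)
        | _ => (none, none)  -- B raises ValueError here, excluded by Pre_
  else (none, none)

-- ===== PRECONDITION & SPEC =====
-- Pre_ excludes exactly the inputs where A raises: a found documento whose row index is
-- out of range in notas (IndexError), or whose row has no non-negative grade (min([]) ValueError).
def Pre_menor_nota_estudiante (documento : Int) (documentos_estudiantes : List Int) (notas : List (List Int)) : Prop :=
  documento ∈ documentos_estudiantes →
    (documentos_estudiantes.idxOf documento < notas.length ∧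
      ∃ n ∈ notas.getD (documentos_estudiantes.idxOf documento) [], 0 ≤ n)
instance (documento : Int) (documentos_estudiantes : List Int) (notas : List (List Int)) : Decidable (Pre_menor_nota_estudiante documento documentos_estudiantes notas) := by unfold Pre_menor_nota_estudiante; infer_instance

def pvWitness_menor_nota_estudiante : Int × List Int × List (List Int) := (7, [3, 7], [[1], [5, -2, 4]])

def Spec_menor_nota_estudiante (documento : Int) (documentos_estudiantes : List Int) (notas : List (List Int)) (out : Option Int × Option Int) : Prop := out = menor_nota_estudiante_alt documento documentos_estudiantes notas
instance (documento : Int) (documentos_estudiantes : List Int) (notas : List (List Int)) (out : Option Int × Option Int) : Decidable (Spec_menor_nota_estudiante documento documentos_estudiantes notas out) := by unfold Spec_menor_nota_estudiante; infer_instance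

-- ===== CLAIM (what is proved, stated in full; the proofs are below) =====
def Claim_equal_menor_nota_estudiante : Prop := ∀ (documento : Int) (documentos_estudiantes : List Int) (notas : List (List Int)), Dom_menor_nota_estudiante documento documentos_estudiantes notas → Pre_menor_nota_estudiante documento documentos_estudiantes notas → Spec_menor_nota_estudiante documento documentos_estudiantes notas (menor_nota_estudiante documento documentos_estudiantes notas)

-- ===== LEMMAS AND PROOFS =====

-- Proof-side spec: first minimum among non-negative grades, with its index.
def pvFm : List Int → Option (Int × Nat)
  | [] => none
  | n :: rest =>
    if n < 0 then (pvFm rest).map (fun p => (p.1, p.2 + 1))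
    else
      match pvFm rest with
      | none => some (n, 0)
      | some (m, k) => if m < n then some (m, k + 1) else some (n, 0)

theorem pvFm_cons_neg {n : Int} (rest : List Int) (hn : n < 0) :
    pvFm (n :: rest) = (pvFm rest).map (fun p => (p.1, p.2 + 1)) := by
  simp [pvFm, hn]

theorem pvFm_cons_nonneg {n : Int} (rest : List Int) (hn : ¬ n < 0) :
    pvFm (n :: rest) =
      match pvFm rest with
      | none => some (n, 0)
      | some (m, k) => if m < n then some (m, k + 1) else some (n, 0) := by
  simp [pvFm, hn]

theorem pvFm_nonneg : ∀ (ns : List Int) (p : Int × Nat), pvFm ns = some p → 0 ≤ p.1 := by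
  intro ns
  induction ns with
  | nil => intro p h; simp [pvFm] at h
  | cons n rest ih =>
    intro p h
    by_cases hn : n < 0
    · rw [pvFm_cons_neg rest hn] at h
      cases hfm : pvFm rest with
      | none => rw [hfm] at h; simp at h
      | some p' =>
        rw [hfm] at h
        simp only [Option.map_some, Option.some.injEq] at h
        subst h
        exact ih p' hfm
    · rw [pvFm_cons_nonneg rest hn] at h
      cases hfm : pvFm rest with
      | none =>
        rw [hfm] at h
        simp only [Option.some.injEq] at h
        rw [← h]; simp; omega
      | some p' =>
        rw [hfm] at h
        by_cases hlt : p'.1 < n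
        · simp only [hlt, if_true, Option.some.injEq] at h
          subst h
          exact ih p' hfm
        · simp only [hlt, if_false, Option.some.injEq] at h
          subst h
          simp; omega

theorem pvFm_index : ∀ (ns : List Int) (p : Int × Nat), pvFm ns = some p →
    PySem.List.index? ns p.1 = some p.2 := by
  intro ns
  induction ns with
  | nil => intro p h; simp [pvFm] at h
  | cons n rest ih =>
    intro p h
    by_cases hn : n < 0
    · rw [pvFm_cons_neg rest hn] at h
      cases hfm : pvFm rest with
      | none => rw [hfm] at h; simp at h
      | some p' =>
        rw [hfm] at h
        simp only [Option.map_some, Option.some.injEq] at h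
        subst h
        have hm0 : 0 ≤ p'.1 := pvFm_nonneg rest p' hfm
        have hne : n ≠ p'.1 := by omega
        rw [PySem.List.index?_cons_of_ne rest hne, ih p' hfm]
        rfl
    · rw [pvFm_cons_nonneg rest hn] at h
      cases hfm : pvFm rest with
      | none =>
        rw [hfm] at h
        simp only [Option.some.injEq] at h
        subst h
        exact PySem.List.index?_cons_self n rest
      | some p' =>
        rw [hfm] at h
        by_cases hlt : p'.1 < n
        · simp only [hlt, if_true, Option.some.injEq] at h
          subst h
          have hne : n ≠ p'.1 := by omega
          rw [PySem.List.index?_cons_of_ne rest hne, ih p' hfm]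
          rfl
        · simp only [hlt, if_false, Option.some.injEq] at h
          subst h
          exact PySem.List.index?_cons_self n rest

theorem pvFoldl_min_eq : ∀ (t : List Int) (a b : Int), t.foldl min (min a b) = min a (t.foldl min b) := by
  intro t
  induction t with
  | nil => intro a b; simp
  | cons h t ih =>
    intro a b
    simp only [List.foldl_cons]
    rw [min_assoc, ih]

-- A's value: min of the non-negative filter = pvFm's value component.
theorem pvFm_min : ∀ (ns : List Int),
    PySem.List.min? (ns.filter (fun nota => decide (0 ≤ nota))) (fun x => x) = (pvFm ns).map Prod.fst := by
  intro ns
  induction ns with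
  | nil => simp [pvFm, PySem.List.min?]
  | cons n rest ih =>
    by_cases hn : n < 0
    · have h0 : ¬ (0 ≤ n) := by omega
      rw [pvFm_cons_neg rest hn]
      simp only [List.filter_cons, h0, decide_false, Bool.false_eq_true, if_false, ih,
        Option.map_map]
      cases pvFm rest <;> rfl
    · have h0 : (0 ≤ n) := by omega
      rw [pvFm_cons_nonneg rest hn]
      simp only [List.filter_cons, h0, decide_true, if_true]
      rw [PySem.List.min?_id_cons]
      cases hfm : pvFm rest with
      | none =>
        have : rest.filter (fun nota => decide (0 ≤ nota)) = [] := by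
          rw [hfm] at ih; simpa [PySem.List.min?_eq_none_iff] using ih
        simp [this]
      | some p =>
        obtain ⟨m, k⟩ := p
        rw [hfm] at ih
        cases ht : rest.filter (fun nota => decide (0 ≤ nota)) with
        | nil => rw [ht] at ih; simp [PySem.List.min?] at ih
        | cons h t =>
          rw [ht] at ih
          rw [PySem.List.min?_id_cons] at ih
          simp only [Option.map_some] at ih
          have hval : t.foldl min h = m := by simpa using ih
          simp only [List.foldl_cons]
          rw [pvFoldl_min_eq, hval]
          by_cases hlt : m < n
          · simp [hlt, min_eq_right (le_of_lt hlt)]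
          · simp [hlt, min_eq_left (by omega : n ≤ m)]

-- B's loop with a running best agrees with pvFm.
theorem pvAltLoop_some : ∀ (ns : List Int) (i b j : Int),
    pvAltLoop ns i (some b, some j) =
      match pvFm ns with
      | none => (some b, some j)
      | some (m, k) => if m < b then (some m, some (i + (k : Int))) else (some b, some j) := by
  intro ns
  induction ns with
  | nil => intro i b j; simp [pvAltLoop, pvFm]
  | cons n rest ih =>
    intro i b j
    by_cases hn : n < 0
    · rw [pvFm_cons_neg rest hn]
      simp only [pvAltLoop, hn, if_true, ih]
      cases hfm : pvFm rest with
      | none => rfl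
      | some p =>
        obtain ⟨m, k⟩ := p
        simp only [Option.map_some]
        by_cases hlt : m < b
        · simp [hlt]; ring_nf
        · simp [hlt]
    · rw [pvFm_cons_nonneg rest hn]
      simp only [pvAltLoop, hn, if_false]
      by_cases hnb : n < b
      · simp only [hnb, if_true, ih]
        cases hfm : pvFm rest with
        | none => simp [hnb]
        | some p =>
          obtain ⟨m, k⟩ := p
          by_cases hlt : m < n
          · have hmb : m < b := by omega
            simp [hlt, hmb]; ring_nf
          · simp [hlt, hnb]
      · simp only [hnb, if_false, ih]
        cases hfm : pvFm rest with
        | none => simp [hnb]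
        | some p =>
          obtain ⟨m, k⟩ := p
          by_cases hlt : m < n
          · by_cases hmb : m < b
            · simp [hlt, hmb]; ring_nf
            · simp [hlt, hmb]
          · have hmb : ¬ m < b := by omega
            simp [hlt, hnb, hmb]

theorem pvAltLoop_none : ∀ (ns : List Int) (i : Int),
    pvAltLoop ns i (none, none) =
      match pvFm ns with
      | none => (none, none)
      | some (m, k) => (some m, some (i + (k : Int))) := by
  intro ns
  induction ns with
  | nil => intro i; simp [pvAltLoop, pvFm]
  | cons n rest ih =>
    intro i
    by_cases hn : n < 0
    · rw [pvFm_cons_neg rest hn]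
      simp only [pvAltLoop, hn, if_true, ih]
      cases pvFm rest with
      | none => rfl
      | some p => obtain ⟨m, k⟩ := p; simp; ring_nf
    · rw [pvFm_cons_nonneg rest hn]
      simp only [pvAltLoop, hn, if_false]
      rw [pvAltLoop_some]
      cases pvFm rest with
      | none => simp
      | some p =>
        obtain ⟨m, k⟩ := p
        by_cases hlt : m < n
        · simp [hlt]; ring_nf
        · simp [hlt]

-- idxOf agrees with index? on members (bridges Pre_ and the ports).
theorem pvIdxOf_index? : ∀ (xs : List Int) (v : Int), v ∈ xs →
    PySem.List.index? xs v = some (xs.idxOf v) := by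
  intro xs
  induction xs with
  | nil => intro v h; simp at h
  | cons x xs ih =>
    intro v h
    by_cases hx : x = v
    · subst hx
      rw [PySem.List.index?_cons_self, List.idxOf_cons_self]
    · have hv : v ∈ xs := by
        rcases List.mem_cons.mp h with h1 | h1
        · exact absurd h1.symm hx
        · exact h1
      rw [PySem.List.index?_cons_of_ne xs hx, ih v hv]
      have hbne : (x == v) = false := by simpa using hx
      simp [List.idxOf_cons, hbne]

-- ===== VERDICT (by name: the statement is the Claim_ definition above) =====
theorem menor_nota_estudiante_spec : Claim_equal_menor_nota_estudiante := by
  unfold Claim_equal_menor_nota_estudiante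
  intro documento docs notas _ hpre
  unfold Spec_menor_nota_estudiante menor_nota_estudiante menor_nota_estudiante_alt
  by_cases hmem : documento ∈ docs
  · obtain ⟨hlen, n0, hn0mem, hn00⟩ := hpre hmem
    rw [pvIdxOf_index? docs documento hmem]
    simp only [hmem, if_true]
    set idx := docs.idxOf documento with hidx
    have hget : PySem.List.pyGet? notas (idx : Int) = some (notas.getD idx []) := by
      rw [PySem.List.pyGet?_natCast, List.getElem?_eq_getElem hlen]
      simp [List.getD_eq_getElem?_getD, List.getElem?_eq_getElem hlen]
    rw [hget]
    simp only []
    set ns := notas.getD idx [] with hns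
    cases hfm : pvFm ns with
    | none =>
      -- impossible: ns has a non-negative element
      exfalso
      have hnone : PySem.List.min? (ns.filter (fun nota => decide (0 ≤ nota))) (fun x => x) = none := by
        rw [pvFm_min, hfm]; rfl
      rw [PySem.List.min?_eq_none_iff] at hnone
      have hni : n0 ∉ ns.filter (fun nota => decide (0 ≤ nota)) := by rw [hnone]; simp
      exact hni (List.mem_filter.mpr ⟨hn0mem, by simpa using hn00⟩)
    | some p =>
      obtain ⟨m, k⟩ := p
      have hmin : PySem.List.min? (ns.filter (fun nota => decide (0 ≤ nota))) (fun x => x) = some m := by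
        rw [pvFm_min, hfm]; rfl
      have hidxm : PySem.List.index? ns m = some k := pvFm_index ns (m, k) hfm
      simp only [hmin, hidxm, pvAltLoop_none, hfm]
      simp
  · simp [hmem]
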